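-- pv_equiv track=rewrite | github.com/mathias-caillard/dashboard-tsp | src/functions/fonction_figure.py | adapt_title
-- ===== SOURCE A (Python) =====
-- def adapt_title(title):
--     if len(title) > 66:
--         i = 66
--         while i > 0 and title[i] != " ":
--             i -= 1
--         if i > 0:
--             title = title[:i] + "<br>" + adapt_title(title[i + 1:])
--     return title
-- ===== SOURCE B (Python) =====
-- def adapt_title(title):
--     parts = []
--     while len(title) > 66:
--         i = 66
--         while i > 0 and title[i] != " ":
--             i -= 1
--         if i == 0:
--             break
--         parts.append(title[:i])
--         title = title[i + 1:]
--     parts.append(title)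
--     return "<br>".join(parts)
-- ===== Notes on version B (the rewrite author's own statement) =====
-- stated objective: simpler
-- what changed: Replaced A's recursion that rebuilds the string with a break tag at every level by a single iterative loop that accumulates the chunks in a list and joins them once at the end.
import Mathlib
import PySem

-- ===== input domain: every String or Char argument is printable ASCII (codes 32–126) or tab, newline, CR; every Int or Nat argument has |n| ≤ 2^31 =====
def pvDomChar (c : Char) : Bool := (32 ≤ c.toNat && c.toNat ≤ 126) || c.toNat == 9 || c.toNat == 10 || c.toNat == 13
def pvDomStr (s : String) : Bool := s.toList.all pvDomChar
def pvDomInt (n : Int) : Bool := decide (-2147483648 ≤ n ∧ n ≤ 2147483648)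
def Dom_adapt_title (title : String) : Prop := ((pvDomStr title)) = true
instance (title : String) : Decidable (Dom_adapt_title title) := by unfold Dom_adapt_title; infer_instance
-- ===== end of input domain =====

-- B replaces A's recursive string-rebuilding with an iterative chunk accumulator joined once at the end (objective: simpler/idiomatic).

-- ===== PORT A =====
-- the inner 'while i > 0 and title[i] != " ": i -= 1' loop (identical in A and B)
def scanSpace (t : List Char) : Nat → Nat
  | 0 => 0
  | (i+1) => if t.getD (i+1) ' ' ≠ ' ' then scanSpace t i else i + 1

-- 'i' (the result of the inner while loop) is inlined as 'scanSpace t 66'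
def adaptA (t : List Char) : List Char :=
  if h : t.length > 66 then
    if scanSpace t 66 > 0 then
      t.take (scanSpace t 66) ++ "<br>".toList ++ adaptA (t.drop (scanSpace t 66 + 1))
    else t
  else t
termination_by t.length
decreasing_by simp; omega

def adapt_title (title : String) : String := String.ofList (adaptA title.toList)

-- ===== PORT B =====
def adaptBloop (parts : List (List Char)) (t : List Char) : List Char :=
  if h : t.length > 66 then
    if scanSpace t 66 = 0 then List.intercalate "<br>".toList (parts ++ [t])
    else adaptBloop (parts ++ [t.take (scanSpace t 66)]) (t.drop (scanSpace t 66 + 1))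
  else List.intercalate "<br>".toList (parts ++ [t])
termination_by t.length
decreasing_by simp; omega

def adapt_title_alt (title : String) : String := String.ofList (adaptBloop [] title.toList)

-- ===== PRECONDITION & SPEC =====
def Spec_adapt_title (title : String) (out : String) : Prop := out = adapt_title_alt title
instance (title : String) (out : String) : Decidable (Spec_adapt_title title out) := by unfold Spec_adapt_title; infer_instance

-- ===== CLAIM (what is proved, stated in full; the proofs are below) =====
def Claim_equal_adapt_title : Prop := ∀ (title : String), Dom_adapt_title title → Spec_adapt_title title (adapt_title title)

-- ===== LEMMAS AND PROOFS =====
def joinAll (parts : List (List Char)) (s : List Char) : List Char :=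
  parts.foldr (fun p acc => p ++ "<br>".toList ++ acc) s

theorem intercalate_snoc (parts : List (List Char)) (s : List Char) :
    List.intercalate "<br>".toList (parts ++ [s]) = joinAll parts s := by
  induction parts with
  | nil => simp [List.intercalate, joinAll]
  | cons p rest ih =>
      obtain ⟨q, l, hq⟩ : ∃ q l, rest ++ [s] = q :: l := by
        cases rest <;> exact ⟨_, _, rfl⟩
      calc List.intercalate "<br>".toList ((p :: rest) ++ [s])
          = p ++ "<br>".toList ++ List.intercalate "<br>".toList (rest ++ [s]) := by
            rw [List.cons_append, hq]; simp [List.intercalate, List.intersperse]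
        _ = joinAll (p :: rest) s := by rw [ih]; rfl

theorem joinAll_snoc (parts : List (List Char)) (x s : List Char) :
    joinAll (parts ++ [x]) s = joinAll parts (x ++ "<br>".toList ++ s) := by
  simp [joinAll, List.foldr_append]

theorem adaptBloop_eq (parts : List (List Char)) (t : List Char) :
    adaptBloop parts t = joinAll parts (adaptA t) := by
  fun_induction adaptBloop parts t with
  | case1 parts t h hi =>
      rw [intercalate_snoc, adaptA, dif_pos h, if_neg (by omega : ¬ scanSpace t 66 > 0)]
  | case2 parts t h hi ih =>
      rw [ih, joinAll_snoc]
      conv_rhs => rw [adaptA, dif_pos h, if_pos (Nat.pos_of_ne_zero hi)]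
  | case3 parts t h =>
      rw [intercalate_snoc, adaptA, dif_neg h]

-- ===== VERDICT (by name: the statement is the Claim_ definition above) =====
theorem adapt_title_spec : Claim_equal_adapt_title := by
  intro title _
  unfold Spec_adapt_title adapt_title adapt_title_alt
  rw [adaptBloop_eq]
  rfl
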